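-- pv_equiv track=rewrite | github.com/HashCanon/hashcanon.github.io | hash_utils/base_hash.py | _uniq_max
-- ===== SOURCE A (Python) =====
-- from typing import List, Dict, Tuple, Optional
--
-- Symmetry = Tuple[int, int, str]  # (start, length, slice)
--
-- def _covers(a_start: int, a_len: int, b_start: int, b_len: int, sectors: int) -> bool:
--     """Return True if segment b is fully covered by segment a on a circle."""
--     for k in range(b_len):
--         pos = (b_start + k) % sectors
--         rel = (pos - a_start + sectors) % sectors
--         if rel >= a_len:
--             return False
--     return True
--
-- def _uniq_max(sym_list: List[Symmetry], sectors: int) -> List[Symmetry]: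
--     """Keep only maximal (non-covered) circular palindromes."""
--     sym_sorted = sorted(sym_list, key=lambda t: t[1], reverse=True)
--     keep: List[Symmetry] = []
--     for cand in sym_sorted:
--         s, L, _ = cand
--         if not any(_covers(S, L0, s, L, sectors) for (S, L0, _) in keep):
--             keep.append(cand)
--     return sorted(keep, key=lambda t: t[0])
-- ===== SOURCE B (Python) =====
-- def _uniq_max(sym_list, sectors):
--     """Keep only maximal (non-covered) circular palindromes.
--
--     A segment of length L starting at s is covered by a kept segment
--     (s0, L0) iff it is empty, or the kept segment spans the whole circle,
--     or it fits inside the kept arc: offset + L <= L0 where offset is the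
--     circular distance from s0 to s.  Each containment test is O(1).
--     """
--     keep = []
--     for s, L, seg in sorted(sym_list, key=lambda t: t[1], reverse=True):
--         covered = any(L <= 0 or L0 >= sectors or (s - s0) % sectors + L <= L0
--                       for s0, L0, _ in keep)
--         if not covered:
--             keep.append((s, L, seg))
--     return sorted(keep, key=lambda t: t[0])
-- ===== Notes on version B (the rewrite author's own statement) =====
-- stated objective: faster
-- what changed: A tests circular coverage by looping over every position of the candidate segment; B decides containment in O(1) arithmetic (empty candidate, full-circle keeper L0 >= sectors, or offset + length fits: (s - s0) % sectors + L <= L0). Pre_ excludes only the inputs where A raises ZeroDivisionError (sectors = 0 with two or more positive-length segments).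
import Mathlib
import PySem

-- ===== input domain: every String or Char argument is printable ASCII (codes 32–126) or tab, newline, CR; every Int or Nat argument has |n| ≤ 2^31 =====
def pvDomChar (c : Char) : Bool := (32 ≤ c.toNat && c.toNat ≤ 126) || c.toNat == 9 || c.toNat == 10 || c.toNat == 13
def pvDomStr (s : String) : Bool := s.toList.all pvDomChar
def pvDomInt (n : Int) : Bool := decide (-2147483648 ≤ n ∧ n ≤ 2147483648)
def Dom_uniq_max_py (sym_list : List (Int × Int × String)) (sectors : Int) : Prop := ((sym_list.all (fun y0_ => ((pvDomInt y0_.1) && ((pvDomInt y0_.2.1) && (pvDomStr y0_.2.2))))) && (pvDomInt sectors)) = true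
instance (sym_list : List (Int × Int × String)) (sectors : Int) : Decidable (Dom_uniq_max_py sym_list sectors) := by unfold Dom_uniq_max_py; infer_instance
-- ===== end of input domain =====

-- B replaces A's per-position circular coverage loop by an O(1) arc-containment
-- test (empty segment, full-circle keeper, or offset + length fits in the arc).

-- ===== PORT A =====
-- A's _covers: the for-k loop with early 'return False' is .all over range(b_len)
def covers_py (a_start a_len b_start b_len sectors : Int) : Bool :=
  (PySem.List.pyRange 0 b_len 1).all (fun k =>
    let pos := PySem.Int.mod (b_start + k) sectors
    let rel := PySem.Int.mod (pos - a_start + sectors) sectors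
    decide (rel < a_len))

def uniq_max_py (sym_list : List (Int × Int × String)) (sectors : Int) : List (Int × Int × String) :=
  let sym_sorted := PySem.List.sorted sym_list (fun t => t.2.1) true
  let keep := sym_sorted.foldl (fun keep cand =>
    if keep.any (fun t => covers_py t.1 t.2.1 cand.1 cand.2.1 sectors) then keep
    else keep ++ [cand]) []
  PySem.List.sorted keep (fun t => t.1) false

-- ===== PORT B =====
def uniq_max_py_alt (sym_list : List (Int × Int × String)) (sectors : Int) : List (Int × Int × String) :=
  let keep := (PySem.List.sorted sym_list (fun t => t.2.1) true).foldl
    (fun keep c =>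
      let covered := keep.any (fun t =>
        decide (c.2.1 ≤ 0) || decide (t.2.1 ≥ sectors) ||
        decide (PySem.Int.mod (c.1 - t.1) sectors + c.2.1 ≤ t.2.1))
      if !covered then keep ++ [c] else keep) []
  PySem.List.sorted keep (fun t => t.1) false

-- ===== PRECONDITION & SPEC =====
-- Pre_ excludes exactly the inputs on which A raises ZeroDivisionError: sectors = 0 together
-- with at least two elements of positive length (the '%' in _covers is then reached with divisor 0).
def Pre_uniq_max_py (sym_list : List (Int × Int × String)) (sectors : Int) : Prop :=
  sectors ≠ 0 ∨ (sym_list.countP (fun t => decide (1 ≤ t.2.1))) ≤ 1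
instance (sym_list : List (Int × Int × String)) (sectors : Int) : Decidable (Pre_uniq_max_py sym_list sectors) := by unfold Pre_uniq_max_py; infer_instance

def pvWitness_uniq_max_py : (List (Int × Int × String)) × Int := ([(0, 3, "aba"), (1, 1, "b")], 5)

def Spec_uniq_max_py (sym_list : List (Int × Int × String)) (sectors : Int) (out : List (Int × Int × String)) : Prop := out = uniq_max_py_alt sym_list sectors
instance (sym_list : List (Int × Int × String)) (sectors : Int) (out : List (Int × Int × String)) : Decidable (Spec_uniq_max_py sym_list sectors out) := by unfold Spec_uniq_max_py; infer_instance

-- ===== CLAIM (what is proved, stated in full; the proofs are below) =====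
def Claim_equal_uniq_max_py : Prop := ∀ (sym_list : List (Int × Int × String)) (sectors : Int), Dom_uniq_max_py sym_list sectors → Pre_uniq_max_py sym_list sectors → Spec_uniq_max_py sym_list sectors (uniq_max_py sym_list sectors)

-- ===== LEMMAS AND PROOFS =====

-- B's containment condition for a keeper t and a candidate c
def alt_cond (sectors : Int) (t c : Int × Int × String) : Bool :=
  decide (c.2.1 ≤ 0) || decide (t.2.1 ≥ sectors) ||
  decide (PySem.Int.mod (c.1 - t.1) sectors + c.2.1 ≤ t.2.1)

theorem rel_eq_pos (a_start b_start k s : Int) (hs : 0 < s) :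
    PySem.Int.mod (PySem.Int.mod (b_start + k) s - a_start + s) s
      = (((b_start - a_start) % s) + k) % s := by
  simp only [PySem.Int.mod_eq_emod_of_pos hs]
  rw [Int.add_emod_right]
  conv_lhs => rw [Int.sub_emod, Int.emod_emod_of_dvd _ dvd_rfl, ← Int.sub_emod]
  conv_rhs => rw [Int.add_emod, Int.emod_emod_of_dvd _ dvd_rfl, ← Int.add_emod]
  ring_nf

theorem covers_eq (a_start a_len b_start b_len sectors : Int)
    (h : sectors ≠ 0 ∨ b_len ≤ 0) (hle : b_len ≤ a_len) :
    covers_py a_start a_len b_start b_len sectors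
      = alt_cond sectors (a_start, a_len, "") (b_start, b_len, "") := by
  by_cases hbl : b_len ≤ 0
  · simp [covers_py, alt_cond, PySem.List.pyRange_one_eq_nil hbl, hbl]
  · have hbl' : 0 < b_len := by omega
    have hs : sectors ≠ 0 := h.resolve_right (by omega)
    rcases lt_trichotomy sectors 0 with hneg | h0 | hpos
    · -- negative sectors: every rel ≤ 0 < b_len ≤ a_len, and a_len ≥ 1 > sectors
      have hA : covers_py a_start a_len b_start b_len sectors = true := by
        simp only [covers_py, List.all_eq_true, PySem.List.mem_pyRange_one, decide_eq_true_eq]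
        intro k _
        have := (PySem.Int.mod_neg_bounds
          (PySem.Int.mod (b_start + k) sectors - a_start + sectors) hneg).2
        omega
      have hB : alt_cond sectors (a_start, a_len, "") (b_start, b_len, "") = true := by
        simp only [alt_cond, Bool.or_eq_true, decide_eq_true_eq]
        omega
      rw [hA, hB]
    · exact absurd h0 hs
    · -- positive sectors
      set r0 := (b_start - a_start) % sectors with hr0def
      have hr0a : 0 ≤ r0 := Int.emod_nonneg _ (by omega)
      have hr0b : r0 < sectors := Int.emod_lt_of_pos _ hpos
      have hiff : covers_py a_start a_len b_start b_len sectors = true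
          ↔ ∀ k : Int, 0 ≤ k → k < b_len → (r0 + k) % sectors < a_len := by
        simp only [covers_py, List.all_eq_true, PySem.List.mem_pyRange_one, decide_eq_true_eq]
        constructor
        · intro H k h1 h2
          have h3 := H k ⟨h1, h2⟩
          rwa [rel_eq_pos _ _ _ _ hpos] at h3
        · intro H k hk
          rw [rel_eq_pos _ _ _ _ hpos]
          exact H k hk.1 hk.2
      have hmodB : PySem.Int.mod (b_start - a_start) sectors = r0 :=
        PySem.Int.mod_eq_emod_of_pos hpos
      rw [Bool.eq_iff_iff, hiff]
      simp only [alt_cond, Bool.or_eq_true, decide_eq_true_eq, hmodB]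
      by_cases hfull : a_len ≥ sectors
      · constructor
        · intro _; omega
        · intro _ k h1 h2
          have := Int.emod_lt_of_pos (r0 + k) hpos
          omega
      · -- a_len < sectors
        constructor
        · intro H
          by_cases hwrap : r0 + b_len ≤ sectors
          · have h5 := H (b_len - 1) (by omega) (by omega)
            rw [Int.emod_eq_of_lt (by omega) (by omega)] at h5
            omega
          · exfalso
            have h5 := H (sectors - 1 - r0) (by omega) (by omega)
            rw [show r0 + (sectors - 1 - r0) = sectors - 1 by ring] at h5
            rw [Int.emod_eq_of_lt (by omega) (by omega)] at h5
            omega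
        · intro H k h1 h2
          have hB : r0 + b_len ≤ a_len := H.resolve_left (by omega)
          rw [Int.emod_eq_of_lt (by omega) (by omega)]
          omega

-- the keep lists of membership-equal any's agree
theorem any_congr_mem {α : Type} (l : List α) (f g : α → Bool)
    (h : ∀ x ∈ l, f x = g x) : l.any f = l.any g := by
  induction l with
  | nil => rfl
  | cons hd tl ih =>
    simp only [List.any_cons, h hd (by simp), ih (fun x hx => h x (by simp [hx]))]

theorem select_eq (sectors : Int) : ∀ (order keep : List (Int × Int × String)),
    order.Pairwise (fun a b => b.2.1 ≤ a.2.1) →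
    (∀ c ∈ order, sectors ≠ 0 ∨ c.2.1 ≤ 0) →
    (∀ t ∈ keep, ∀ c ∈ order, c.2.1 ≤ t.2.1) →
    order.foldl (fun keep cand =>
      if keep.any (fun t => covers_py t.1 t.2.1 cand.1 cand.2.1 sectors) then keep
      else keep ++ [cand]) keep
    = order.foldl (fun keep c =>
      let covered := keep.any (fun t =>
        decide (c.2.1 ≤ 0) || decide (t.2.1 ≥ sectors) ||
        decide (PySem.Int.mod (c.1 - t.1) sectors + c.2.1 ≤ t.2.1))
      if !covered then keep ++ [c] else keep) keep
  | [], keep, _, _, _ => rfl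
  | cand :: rest, keep, hpw, hz, hinv => by
    simp only [List.foldl_cons]
    have hany : keep.any (fun t => covers_py t.1 t.2.1 cand.1 cand.2.1 sectors)
        = keep.any (fun t =>
            decide (cand.2.1 ≤ 0) || decide (t.2.1 ≥ sectors) ||
            decide (PySem.Int.mod (cand.1 - t.1) sectors + cand.2.1 ≤ t.2.1)) := by
      refine any_congr_mem keep _ _ (fun t ht => ?_)
      have h1 : sectors ≠ 0 ∨ cand.2.1 ≤ 0 := hz cand (by simp)
      have h2 : cand.2.1 ≤ t.2.1 := hinv t ht cand (by simp)
      simpa [alt_cond] using covers_eq t.1 t.2.1 cand.1 cand.2.1 sectors h1 h2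
    have hpw' := List.pairwise_cons.1 hpw
    have hz' : ∀ c ∈ rest, sectors ≠ 0 ∨ c.2.1 ≤ 0 := fun c hc => hz c (by simp [hc])
    rw [← hany]
    by_cases hcov : keep.any (fun t => covers_py t.1 t.2.1 cand.1 cand.2.1 sectors) = true
    · simp only [hcov, if_pos, Bool.not_true, Bool.false_eq_true, if_false]
      exact select_eq sectors rest keep hpw'.2 hz'
        (fun t ht c hc => hinv t ht c (by simp [hc]))
    · simp only [hcov, Bool.not_false, if_pos, Bool.false_eq_true, if_false]
      refine select_eq sectors rest (keep ++ [cand]) hpw'.2 hz' ?_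
      intro t ht c hc
      rcases List.mem_append.1 ht with ht' | ht'
      · exact hinv t ht' c (by simp [hc])
      · have : t = cand := by simpa using ht'
        subst this
        exact hpw'.1 c hc

theorem select_eq_zero (sectors : Int) (order : List (Int × Int × String))
    (hcnt : order.countP (fun t => decide (1 ≤ t.2.1)) ≤ 1)
    (hpw : order.Pairwise (fun a b => b.2.1 ≤ a.2.1)) :
    order.foldl (fun keep cand =>
      if keep.any (fun t => covers_py t.1 t.2.1 cand.1 cand.2.1 sectors) then keep
      else keep ++ [cand]) []
    = order.foldl (fun keep c =>
      let covered := keep.any (fun t =>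
        decide (c.2.1 ≤ 0) || decide (t.2.1 ≥ sectors) ||
        decide (PySem.Int.mod (c.1 - t.1) sectors + c.2.1 ≤ t.2.1))
      if !covered then keep ++ [c] else keep) [] := by
  match order with
  | [] => rfl
  | hd :: tl =>
    have hpw' := List.pairwise_cons.1 hpw
    have htl : ∀ t ∈ tl, sectors ≠ 0 ∨ t.2.1 ≤ 0 := by
      intro t ht
      right
      by_contra hc
      have hle : t.2.1 ≤ hd.2.1 := hpw'.1 t ht
      have h3 : 0 < tl.countP (fun t => decide (1 ≤ t.2.1)) :=
        List.countP_pos_iff.2 ⟨t, ht, by simp; omega⟩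
      simp only [List.countP_cons] at hcnt
      have h2 : (decide (1 ≤ hd.2.1) : Bool) = true := by simp; omega
      simp only at h2
      rw [h2] at hcnt
      have : List.countP (fun t : Int × Int × String => decide (1 ≤ t.2.1)) tl + 1 ≤ 1 := by
        simpa using hcnt
      omega
    simp only [List.foldl_cons, List.any_nil, Bool.false_eq_true, if_false,
      Bool.not_false, if_pos, List.nil_append]
    exact select_eq sectors tl [hd] hpw'.2 htl
      (fun t ht c hc => by
        have : t = hd := by simpa using ht
        subst this; exact hpw'.1 c hc)

theorem uniq_max_main (sym_list : List (Int × Int × String)) (sectors : Int)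
    (hpre : Pre_uniq_max_py sym_list sectors) :
    uniq_max_py sym_list sectors = uniq_max_py_alt sym_list sectors := by
  have hpwr := PySem.List.sorted_pairwise_rev sym_list (fun t : Int × Int × String => t.2.1)
  have key : (PySem.List.sorted sym_list (fun t => t.2.1) true).foldl (fun keep cand =>
      if keep.any (fun t => covers_py t.1 t.2.1 cand.1 cand.2.1 sectors) then keep
      else keep ++ [cand]) []
      = (PySem.List.sorted sym_list (fun t => t.2.1) true).foldl (fun keep c =>
      let covered := keep.any (fun t =>
        decide (c.2.1 ≤ 0) || decide (t.2.1 ≥ sectors) ||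
        decide (PySem.Int.mod (c.1 - t.1) sectors + c.2.1 ≤ t.2.1))
      if !covered then keep ++ [c] else keep) [] := by
    rcases hpre with hs | hcnt
    · exact select_eq sectors _ [] hpwr (fun t _ => Or.inl hs) (by simp)
    · refine select_eq_zero sectors _ ?_ hpwr
      rw [(PySem.List.sorted_perm sym_list (fun t : Int × Int × String => t.2.1) true).countP_eq]
      exact_mod_cast hcnt
  exact congrArg (fun l => PySem.List.sorted l (fun t : Int × Int × String => t.1) false) key

-- ===== VERDICT (by name: the statement is the Claim_ definition above) =====
theorem uniq_max_py_spec : Claim_equal_uniq_max_py := by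
  intro sym_list sectors _ hpre
  exact uniq_max_main sym_list sectors hpre
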